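-- pv_equiv track=rewrite | github.com/ReneFabricius/project-euler | pr164.py | pr164
-- ===== SOURCE A (Python) =====
-- def pr164(n):
--     if n < 3:
--         return 0
--     en = 100
--     lt1 = [0] * en
--     lt2 = [0] * en
--
--     for i in range(100, 1000):
--         si = i
--         ds = 0
--         while si > 0:
--             ds += si % 10
--             si //= 10
--         if ds < 10:
--             lt = i % 100
--             lt1[lt] += 1
--
--     for d in range(n - 3):
--         for i in range(len(lt1)):
--             if lt1[i] > 0:
--                 cs = i % 10 + i // 10
--                 for ld in range(10):
--                     if cs + ld < 10:
--                         lt2[(i % 10) * 10 + ld] += lt1[i]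
--
--                 lt1[i] = 0
--
--         temp = lt1
--         lt1 = lt2
--         lt2 = temp
--
--     return sum(lt1)
-- ===== SOURCE B (Python) =====
-- def pr164(n):
--     if n < 3:
--         return 0
--     # counts of 3-digit prefixes, bucketed by last two digits (t, u) -> index 10*t+u:
--     # first digit a in 1..9 with a + t + u < 10, i.e. max(0, 9 - (t + u)) choices
--     v = [max(0, 9 - (i // 10 + i % 10)) for i in range(100)]
--     for _ in range(n - 3):
--         # pre[u][m] = sum of v[t*10+u] over t <= m  (column prefix sums)
--         pre = []
--         for u in range(10):
--             acc = 0
--             col = []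
--             for t in range(10):
--                 acc += v[t * 10 + u]
--                 col.append(acc)
--             pre.append(col)
--         # new state (u, d): gather all old states (t, u) with t + u + d < 10
--         v = [pre[j // 10][9 - j // 10 - j % 10] if j // 10 + j % 10 <= 9 else 0
--              for j in range(100)]
--     return sum(v)
-- ===== Notes on version B (the rewrite author's own statement) =====
-- stated objective: alternative
-- what changed: B replaces A's brute-force seeding over all three-digit numbers by a closed-form seed vector, and replaces each DP step's guarded scatter (an inner ten-way distribution loop per state) by column prefix sums followed by a direct gather.
import Mathlib
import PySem

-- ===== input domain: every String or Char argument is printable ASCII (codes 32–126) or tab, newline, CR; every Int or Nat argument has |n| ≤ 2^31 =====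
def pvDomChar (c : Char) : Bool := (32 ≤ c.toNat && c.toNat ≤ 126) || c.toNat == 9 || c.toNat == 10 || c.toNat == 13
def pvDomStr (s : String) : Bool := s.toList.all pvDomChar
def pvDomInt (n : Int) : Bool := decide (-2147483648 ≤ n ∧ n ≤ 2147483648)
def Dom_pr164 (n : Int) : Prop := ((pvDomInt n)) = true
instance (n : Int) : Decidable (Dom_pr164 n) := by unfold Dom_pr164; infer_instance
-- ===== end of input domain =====

-- B keeps the 100-state DP but replaces A's brute-force seeding over all three-digit
-- numbers by a closed-form seed vector, and each step's guarded scatter (inner 10-way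
-- distribution loop) by column prefix sums plus a direct gather; same exact results.

-- ===== PORT A =====
-- while si > 0: ds += si % 10; si //= 10   — fuel = si.toNat is enough (si strictly shrinks each step);
-- structural recursion so the kernel can evaluate it.
def pvDigitLoop : Nat → Int → Int → Int
  | 0, _, ds => ds
  | fuel+1, si, ds =>
    if si > 0 then pvDigitLoop fuel (PySem.Int.floordiv si 10) (ds + PySem.Int.mod si 10) else ds

-- the first for-loop of A: seed counts of 3-digit numbers, bucketed by last two digits
def pvInitA : List Int :=
  (PySem.List.pyRange 100 1000 1).foldl (fun lt1 i =>
    let ds := pvDigitLoop i.toNat i 0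
    if ds < 10 then
      let lt := (PySem.Int.mod i 100).toNat
      lt1.set lt (lt1.getD lt 0 + 1)
    else lt1) (List.replicate 100 0)

-- body of "for i in range(len(lt1))" (state = (lt1, lt2)); Python indices here are Nat
def pvStepBody (p : List Int × List Int) (i : Nat) : List Int × List Int :=
  if p.1.getD i 0 > 0 then
    let cs := i % 10 + i / 10
    let l2 := (List.range 10).foldl (fun l2 ld =>
      if cs + ld < 10 then
        l2.set ((i % 10) * 10 + ld) (l2.getD ((i % 10) * 10 + ld) 0 + p.1.getD i 0)
      else l2) p.2
    (p.1.set i 0, l2)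
  else p

def pr164 (n : Int) : Int :=
  if n < 3 then 0
  else
    let r := (List.range (n - 3).toNat).foldl (fun p _ =>
      let q := (List.range p.1.length).foldl pvStepBody p
      (q.2, q.1)) (pvInitA, List.replicate 100 0)
    r.1.sum

-- ===== PORT B =====
-- 3-digit seeds: max(0, 9 - (i//10 + i%10))
def pvInitBvec : List Int :=
  (List.range 100).map (fun i => max 0 (9 - ((i / 10 + i % 10 : ℕ) : Int)))

-- acc = 0; col = []; for t in range(10): acc += v[t*10+u]; col.append(acc)
def pvPreCol (v : List Int) (u : ℕ) : List Int :=
  ((List.range 10).foldl (fun (p : Int × List Int) t =>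
    (p.1 + v.getD (t * 10 + u) 0, p.2 ++ [p.1 + v.getD (t * 10 + u) 0])) (0, [])).2

-- pre = [column of prefix sums for each u in range(10)]
def pvPre (v : List Int) : List (List Int) :=
  (List.range 10).map (fun u => pvPreCol v u)

-- v = [pre[j//10][9 - j//10 - j%10] if j//10 + j%10 <= 9 else 0 for j in range(100)]
def pvBStep (v : List Int) : List Int :=
  let pre := pvPre v
  (List.range 100).map (fun j =>
    if j / 10 + j % 10 ≤ 9 then (pre.getD (j / 10) []).getD (9 - j / 10 - j % 10) 0 else 0)

def pr164_alt (n : Int) : Int :=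
  if n < 3 then 0
  else ((List.range (n - 3).toNat).foldl (fun v _ => pvBStep v) pvInitBvec).sum

-- ===== PRECONDITION & SPEC =====
def Spec_pr164 (n : Int) (out : Int) : Prop := out = pr164_alt n
instance (n : Int) (out : Int) : Decidable (Spec_pr164 n out) := by unfold Spec_pr164; infer_instance

-- ===== CLAIM (what is proved, stated in full; the proofs are below) =====
def Claim_equal_pr164 : Prop := ∀ (n : Int), Dom_pr164 n → Spec_pr164 n (pr164 n)

-- ===== LEMMAS AND PROOFS =====

-- 0/1 coefficient: may state i be followed by state j in the DP
def pvM0 (i j : ℕ) : Int :=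
  if j / 10 = i % 10 ∧ i / 10 + i % 10 + j % 10 < 10 then 1 else 0

-- semantic one-step map: the linear map both programs iterate
def pvS (v : List Int) : List Int :=
  (List.range 100).map (fun j => ((List.range 100).map (fun i => v.getD i 0 * pvM0 i j)).sum)

lemma pvS_length (v : List Int) : (pvS v).length = 100 := by simp [pvS]

lemma pvS_getD (v : List Int) (j : ℕ) (hj : j < 100) :
    (pvS v).getD j 0 = ((List.range 100).map (fun i => v.getD i 0 * pvM0 i j)).sum := by
  unfold pvS
  rw [PySem.List.getD_map_range _ _ _ _ hj]

lemma pvS_nonneg (v : List Int) (hv : ∀ j, 0 ≤ v.getD j 0) (j : ℕ) : 0 ≤ (pvS v).getD j 0 := by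
  by_cases hj : j < 100
  · rw [pvS_getD v j hj]
    apply List.sum_nonneg
    intro x hx
    simp only [List.mem_map, List.mem_range] at hx
    obtain ⟨i, -, rfl⟩ := hx
    have := hv i
    unfold pvM0
    split_ifs with h
    · simpa using this
    · simp
  · rw [List.getD_eq_default _ _ (by rw [pvS_length]; omega)]

lemma pvGetD_set_ne (u : List Int) (a : Int) (m j : ℕ) (h : m ≠ j) :
    (u.set m a).getD j 0 = u.getD j 0 := by
  by_cases hj : j < u.length
  · rw [List.getD_eq_getElem _ _ (by simpa), List.getElem_set, if_neg h,
        List.getD_eq_getElem _ _ hj]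
  · rw [List.getD_eq_default _ _ (by simpa using hj), List.getD_eq_default _ _ (by omega)]

lemma pvGetD_set_self (u : List Int) (a : Int) (m : ℕ) (h : m < u.length) :
    (u.set m a).getD m 0 = a := by
  rw [List.getD_eq_getElem _ _ (by simpa), List.getElem_set, if_pos rfl]

lemma pvInner_spec (i : ℕ) (x : Int) (L : List ℕ) (hL : ∀ l ∈ L, l < 10) (hnd : L.Nodup)
    (w : List Int) (hw : w.length = 100) :
    (L.foldl (fun l2 ld =>
        if i % 10 + i / 10 + ld < 10 then
          l2.set ((i % 10) * 10 + ld) (l2.getD ((i % 10) * 10 + ld) 0 + x)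
        else l2) w).length = 100 ∧
    ∀ j, j < 100 →
      (L.foldl (fun l2 ld =>
        if i % 10 + i / 10 + ld < 10 then
          l2.set ((i % 10) * 10 + ld) (l2.getD ((i % 10) * 10 + ld) 0 + x)
        else l2) w).getD j 0
      = w.getD j 0 + (if j % 10 ∈ L then x * pvM0 i j else 0) := by
  induction L generalizing w with
  | nil => exact ⟨hw, fun j hj => by simp⟩
  | cons ld L' ih =>
    have hld : ld < 10 := hL ld List.mem_cons_self
    have hnotin : ld ∉ L' := (List.nodup_cons.mp hnd).1
    simp only [List.foldl_cons]
    set w1 := if i % 10 + i / 10 + ld < 10 then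
        w.set ((i % 10) * 10 + ld) (w.getD ((i % 10) * 10 + ld) 0 + x) else w with hw1def
    have hw1len : w1.length = 100 := by
      rw [hw1def]; split_ifs <;> simp [hw]
    obtain ⟨hlen, hval⟩ := ih (fun l hl => hL l (List.mem_cons_of_mem _ hl))
      (List.nodup_cons.mp hnd).2 w1 hw1len
    refine ⟨hlen, fun j hj => ?_⟩
    rw [hval j hj]
    have hw1j : w1.getD j 0
        = w.getD j 0 + (if j = (i % 10) * 10 + ld ∧ i % 10 + i / 10 + ld < 10 then x else 0) := by
      rw [hw1def]
      split_ifs with hc he he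
      · obtain ⟨he1, -⟩ := he
        subst he1
        rw [List.getD_eq_getElem _ _ (by simp [hw]; omega), List.getElem_set, if_pos rfl]
      · rw [List.getD_eq_getElem _ _ (by simp [hw]; omega), List.getElem_set,
            if_neg (by intro h; exact he ⟨h.symm, hc⟩), add_zero]
        exact (List.getD_eq_getElem _ _ (by omega)).symm
      · omega
      · rw [add_zero]
    rw [hw1j]
    by_cases hjd : j % 10 = ld
    · have hnotin' : j % 10 ∉ L' := by rw [hjd]; exact hnotin
      rw [if_neg hnotin', add_zero, if_pos (List.mem_cons.mpr (Or.inl hjd))]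
      unfold pvM0
      have hiff : (j = (i % 10) * 10 + ld ∧ i % 10 + i / 10 + ld < 10)
          ↔ (j / 10 = i % 10 ∧ i / 10 + i % 10 + j % 10 < 10) := by omega
      simp only [← hiff]
      split_ifs with h <;> ring
    · have hne : j ≠ (i % 10) * 10 + ld := by omega
      rw [if_neg (fun hP => hne hP.1), add_zero]
      simp only [List.mem_cons, hjd, false_or]

lemma pvOuter_spec (L : List ℕ) (hL : ∀ i ∈ L, i < 100) (hnd : L.Nodup)
    (v w : List Int) (hv : v.length = 100) (hw : w.length = 100)
    (hpos : ∀ j, 0 ≤ v.getD j 0) :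
    (L.foldl pvStepBody (v, w)).1.length = 100 ∧
    (L.foldl pvStepBody (v, w)).2.length = 100 ∧
    (∀ j, j < 100 → (L.foldl pvStepBody (v, w)).1.getD j 0 = if j ∈ L then 0 else v.getD j 0) ∧
    (∀ j, j < 100 → (L.foldl pvStepBody (v, w)).2.getD j 0
        = w.getD j 0 + (L.map (fun i => v.getD i 0 * pvM0 i j)).sum) := by
  induction L generalizing v w with
  | nil => exact ⟨hv, hw, fun j hj => by simp, fun j hj => by simp⟩
  | cons i L' ih =>
    have hi : i < 100 := hL i List.mem_cons_self
    have hnotin : i ∉ L' := (List.nodup_cons.mp hnd).1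
    have hL' : ∀ l ∈ L', l < 100 := fun l hl => hL l (List.mem_cons_of_mem _ hl)
    have hnd' : L'.Nodup := (List.nodup_cons.mp hnd).2
    simp only [List.foldl_cons]
    by_cases hx : v.getD i 0 > 0
    · rw [show pvStepBody (v, w) i = (v.set i 0,
          (List.range 10).foldl (fun l2 ld =>
            if i % 10 + i / 10 + ld < 10 then
              l2.set ((i % 10) * 10 + ld) (l2.getD ((i % 10) * 10 + ld) 0 + v.getD i 0)
            else l2) w) from by simp only [pvStepBody, if_pos hx]]
      obtain ⟨hW1len, hW1⟩ := pvInner_spec i (v.getD i 0) (List.range 10)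
        (fun l hl => List.mem_range.mp hl) List.nodup_range w hw
      obtain ⟨h1, h2, h3, h4⟩ := ih hL' hnd' (v.set i 0) _ (by simp [hv]) hW1len
        (fun j => by
          by_cases hji : i = j
          · subst hji; rw [pvGetD_set_self _ _ _ (by omega)]
          · rw [pvGetD_set_ne _ _ _ _ hji]; exact hpos j)
      refine ⟨h1, h2, fun j hj => ?_, fun j hj => ?_⟩
      · rw [h3 j hj]
        by_cases hjL : j ∈ L'
        · rw [if_pos hjL, if_pos (List.mem_cons_of_mem _ hjL)]
        · rw [if_neg hjL]
          by_cases hji : i = j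
          · subst hji
            rw [if_pos List.mem_cons_self, pvGetD_set_self _ _ _ (by omega)]
          · rw [pvGetD_set_ne _ _ _ _ hji,
                if_neg (fun hmem => by
                  rcases List.mem_cons.mp hmem with h | h
                  · exact hji h.symm
                  · exact hjL h)]
      · rw [h4 j hj, hW1 j hj, if_pos (List.mem_range.mpr (Nat.mod_lt _ (by norm_num))),
            List.map_cons, List.sum_cons,
            List.map_congr_left (fun i' hi' =>
              show (v.set i 0).getD i' 0 * pvM0 i' j = v.getD i' 0 * pvM0 i' j from by
                rw [pvGetD_set_ne _ _ _ _ (fun h => hnotin (by rwa [h]))])]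
        ring
    · have hx0 : v.getD i 0 = 0 := le_antisymm (by omega) (hpos i)
      rw [show pvStepBody (v, w) i = (v, w) from by simp only [pvStepBody, if_neg hx]]
      obtain ⟨h1, h2, h3, h4⟩ := ih hL' hnd' v w hv hw hpos
      refine ⟨h1, h2, fun j hj => ?_, fun j hj => ?_⟩
      · rw [h3 j hj]
        by_cases hjL : j ∈ L'
        · rw [if_pos hjL, if_pos (List.mem_cons_of_mem _ hjL)]
        · rw [if_neg hjL]
          by_cases hji : i = j
          · subst hji; rw [if_pos List.mem_cons_self, hx0]
          · rw [if_neg (fun hmem => by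
                  rcases List.mem_cons.mp hmem with h | h
                  · exact hji h.symm
                  · exact hjL h)]
      · rw [h4 j hj, List.map_cons, List.sum_cons, hx0, zero_mul, zero_add]

-- one d-iteration of A (inner i-loop plus swap, reading the pair backwards)
-- equals pvS on a nonnegative length-100 state
lemma pvStep_eq (v : List Int) (hv : v.length = 100) (hpos : ∀ j, 0 ≤ v.getD j 0) :
    (List.range v.length).foldl pvStepBody (v, List.replicate 100 0)
      = (List.replicate 100 0, pvS v) := by
  rw [hv]
  obtain ⟨h1, h2, h3, h4⟩ := pvOuter_spec (List.range 100)
    (fun l hl => List.mem_range.mp hl) List.nodup_range v (List.replicate 100 0) hv (by simp) hpos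
  have e1 : ((List.range 100).foldl pvStepBody (v, List.replicate 100 0)).1
      = List.replicate 100 (0 : Int) := by
    apply List.ext_getElem (by rw [h1]; simp)
    intro j hj1 hj2
    have hj : j < 100 := by rwa [h1] at hj1
    rw [← List.getD_eq_getElem _ 0 hj1, h3 j hj, if_pos (List.mem_range.mpr hj),
        List.getElem_replicate]
  have e2 : ((List.range 100).foldl pvStepBody (v, List.replicate 100 0)).2 = pvS v := by
    apply List.ext_getElem (by rw [h2, pvS_length])
    intro j hj1 hj2
    have hj : j < 100 := by rwa [h2] at hj1
    rw [← List.getD_eq_getElem _ 0 hj1, ← List.getD_eq_getElem _ 0 hj2,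
        h4 j hj, pvS_getD v j hj,
        show (List.replicate 100 (0 : Int)).getD j 0 = 0 from by
          rw [List.getD_eq_getElem _ 0 (by simpa using hj), List.getElem_replicate],
        zero_add]
  rw [Prod.ext_iff]
  exact ⟨e1, e2⟩

-- A's d-loop = iterating pvS
lemma pvALoop_eq (K : ℕ) (v : List Int) (hv : v.length = 100) (hpos : ∀ j, 0 ≤ v.getD j 0) :
    (List.range K).foldl (fun p _ =>
      let q := (List.range p.1.length).foldl pvStepBody p
      (q.2, q.1)) (v, List.replicate 100 0) = (pvS^[K] v, List.replicate 100 0) := by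
  induction K with
  | zero => simp
  | succ K ih =>
    have hit : (pvS^[K] v).length = 100 ∧ ∀ j, 0 ≤ (pvS^[K] v).getD j 0 := by
      clear ih
      induction K with
      | zero => exact ⟨hv, hpos⟩
      | succ K ih2 =>
        rw [Function.iterate_succ_apply']
        exact ⟨pvS_length _, pvS_nonneg _ ih2.2⟩
    rw [List.range_succ, List.foldl_append, ih]
    simp only [List.foldl_cons, List.foldl_nil]
    rw [pvStep_eq _ hit.1 hit.2, Function.iterate_succ_apply']

-- prefix-sum fold: running total and list of partial sums
lemma pvPreFold_spec (x : ℕ → Int) (N : ℕ) :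
    (List.range N).foldl (fun (p : Int × List Int) t =>
      (p.1 + x t, p.2 ++ [p.1 + x t])) (0, [])
    = (∑ t ∈ Finset.range N, x t,
       (List.range N).map (fun m => ∑ t ∈ Finset.range (m + 1), x t)) := by
  induction N with
  | zero => simp
  | succ N ih =>
    rw [List.range_succ, List.foldl_append, ih]
    simp only [List.foldl_cons, List.foldl_nil, List.map_append, List.map_cons, List.map_nil]
    rw [Prod.ext_iff]
    exact ⟨(Finset.sum_range_succ x N).symm, by rw [Finset.sum_range_succ x N]⟩

lemma pvPreCol_getD (v : List Int) (u m : ℕ) (hm : m < 10) :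
    (pvPreCol v u).getD m 0 = ∑ t ∈ Finset.range (m + 1), v.getD (t * 10 + u) 0 := by
  unfold pvPreCol
  rw [pvPreFold_spec]
  rw [PySem.List.getD_map_range _ _ _ _ hm]

-- B's gather-with-prefix-sums step is the same linear map pvS that A iterates
lemma pvBStep_eq_pvS (v : List Int) : pvBStep v = pvS v := by
  unfold pvBStep pvS
  refine List.map_congr_left (fun j hj => ?_)
  rw [List.mem_range] at hj
  have hsplit : ((List.range 100).map (fun i => v.getD i 0 * pvM0 i j)).sum
      = ∑ t ∈ Finset.range 10, ∑ w ∈ Finset.range 10, v.getD (10 * t + w) 0 * pvM0 (10 * t + w) j := by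
    show ∑ i ∈ Finset.range (10 * 10), v.getD i 0 * pvM0 i j = _
    rw [← Finset.sum_product']
    rfl
  rw [hsplit]
  have hinner : ∀ t ∈ Finset.range 10,
      ∑ w ∈ Finset.range 10, v.getD (10 * t + w) 0 * pvM0 (10 * t + w) j
      = if t + j / 10 + j % 10 < 10 then v.getD (10 * t + j / 10) 0 else 0 := by
    intro t ht
    rw [Finset.mem_range] at ht
    have step : ∀ w ∈ Finset.range 10,
        v.getD (10 * t + w) 0 * pvM0 (10 * t + w) j
        = if w = j / 10 then (if t + j / 10 + j % 10 < 10 then v.getD (10 * t + j / 10) 0 else 0)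
          else 0 := by
      intro w hw
      rw [Finset.mem_range] at hw
      have e1 : (10 * t + w) % 10 = w := by omega
      have e2 : (10 * t + w) / 10 = t := by omega
      unfold pvM0
      rw [e1, e2]
      by_cases hwj : w = j / 10
      · subst hwj
        rw [if_pos rfl]
        by_cases hc : t + j / 10 + j % 10 < 10
        · rw [if_pos ⟨rfl, by omega⟩, if_pos (by omega), mul_one]
        · rw [if_neg (fun h => hc (by omega)), if_neg (by omega), mul_zero]
      · rw [if_neg hwj, if_neg (fun h => hwj h.1.symm), mul_zero]
    rw [Finset.sum_congr rfl step, Finset.sum_ite_eq' (Finset.range 10) (j / 10),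
        if_pos (Finset.mem_range.mpr (by omega))]
  rw [Finset.sum_congr rfl hinner]
  by_cases hud : j / 10 + j % 10 ≤ 9
  · rw [if_pos hud]
    unfold pvPre
    rw [PySem.List.getD_map_range _ _ _ _ (show j / 10 < 10 by omega),
        pvPreCol_getD v (j / 10) _ (by omega)]
    rw [show 9 - j / 10 - j % 10 + 1 = 10 - j / 10 - j % 10 from by omega]
    calc ∑ t ∈ Finset.range (10 - j / 10 - j % 10), v.getD (t * 10 + j / 10) 0
        = ∑ t ∈ Finset.range (10 - j / 10 - j % 10),
            (if t + j / 10 + j % 10 < 10 then v.getD (10 * t + j / 10) 0 else 0) := by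
          refine Finset.sum_congr rfl (fun t ht => ?_)
          rw [Finset.mem_range] at ht
          rw [if_pos (by omega), mul_comm t 10]
      _ = ∑ t ∈ Finset.range 10,
            (if t + j / 10 + j % 10 < 10 then v.getD (10 * t + j / 10) 0 else 0) :=
          Finset.sum_subset
            (fun x hx => by rw [Finset.mem_range] at *; omega)
            (fun t ht hnt => by
              rw [Finset.mem_range] at ht hnt
              exact if_neg (by omega))
  · rw [if_neg hud]
    exact (Finset.sum_eq_zero (fun t ht => by
      rw [Finset.mem_range] at ht
      rw [if_neg (by omega)])).symm

-- B's for-loop = iterating pvBStep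
lemma pvBLoop_eq (K : ℕ) (v : List Int) :
    (List.range K).foldl (fun v _ => pvBStep v) v = pvBStep^[K] v := by
  induction K with
  | zero => rfl
  | succ K ih => rw [List.range_succ, List.foldl_append, ih, List.foldl_cons, List.foldl_nil,
      Function.iterate_succ_apply']

set_option maxRecDepth 40000 in
lemma pvInit_eq : pvInitA = pvInitBvec := by decide

lemma pvInitBvec_length : pvInitBvec.length = 100 := by simp [pvInitBvec]

lemma pvInitBvec_nonneg (j : ℕ) : 0 ≤ pvInitBvec.getD j 0 := by
  by_cases hj : j < 100
  · rw [pvInitBvec, PySem.List.getD_map_range _ _ _ _ hj]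
    exact le_max_left _ _
  · rw [List.getD_eq_default _ _ (by rw [pvInitBvec_length]; omega)]

-- ===== VERDICT (by name: the statement is the Claim_ definition above) =====
theorem pr164_spec : Claim_equal_pr164 := by
  unfold Claim_equal_pr164 Spec_pr164
  intro n _
  by_cases hn : n < 3
  · simp [pr164, pr164_alt, hn]
  · simp only [pr164, pr164_alt, if_neg hn]
    rw [pvALoop_eq _ _ (by rw [pvInit_eq]; exact pvInitBvec_length)
        (by rw [pvInit_eq]; exact pvInitBvec_nonneg),
        pvBLoop_eq, pvInit_eq,
        show pvBStep = pvS from funext pvBStep_eq_pvS]
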